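-- pv_equiv track=rewrite | github.com/Kartik23411/netsense | src/analysis/ipv6_analyzer.py | compress_address
-- ===== SOURCE A (Python) =====
-- def compress_address(addr):
--     blocks = addr.lower().split(":")
--     blocks = [block.lstrip('0') or '0' for block in blocks]
--
--     longest_start = -1
--     longest_len = 0
--     i=0
--     while i < len(blocks):
--         if blocks[i] == "0":
--             j=i
--             while j < len(blocks) and blocks[j] == "0":
--                 j+=1
--             length = j-i
--             if length > longest_len:
--                 longest_len = length
--                 longest_start = i
--             i=j
--         else:
--             i+=1
--
--     if longest_len > 1:
--         blocks = (
--             blocks[:longest_start]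
--             + ['']
--             + blocks[longest_start + longest_len:]
--         )
--
--     compressed = ':'.join(blocks)
--
--     # edge cases (:: at start or end)
--     if compressed.startswith('::'):
--         pass
--     elif compressed.startswith(':'):
--         compressed = ':' + compressed
--
--     if compressed.endswith('::'):
--         pass
--     elif compressed.endswith(':') and not compressed.endswith('::'):
--         compressed = compressed + ':'
--
--     return compressed
-- ===== SOURCE B (Python) =====
-- def compress_address(addr):
--     blocks = [block.lstrip('0') or '0' for block in addr.lower().split(':')]
--     n = len(blocks)
--
--     # Brute force: one candidate per window of consecutive zero blocks (length >= 2),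
--     # plus the uncompressed form; the shortest joined string wins (first on ties,
--     # which is exactly the first longest zero run, since splicing a window of k
--     # zero blocks shortens the join by 2k-1 characters).
--     candidates = [blocks]
--     for i in range(n):
--         for j in range(i, n):
--             if blocks[j] != '0':
--                 break
--             if j > i:
--                 candidates.append(blocks[:i] + [''] + blocks[j + 1:])
--     best = min(candidates, key=lambda bs: len(':'.join(bs)))
--
--     compressed = ':'.join(best)
--
--     if compressed.startswith('::'):
--         pass
--     elif compressed.startswith(':'):
--         compressed = ':' + compressed
--
--     if compressed.endswith('::'):
--         pass
--     elif compressed.endswith(':') and not compressed.endswith('::'):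
--         compressed = compressed + ':'
--
--     return compressed
-- ===== Notes on version B (the rewrite author's own statement) =====
-- stated objective: alternative
-- what changed: A's stateful linear scan that tracks (longest_start, longest_len) while jumping over zero runs is replaced by brute force: enumerate every window of >=2 consecutive zero blocks as a spliced candidate and let min() pick the candidate with the shortest ':'-joined string (splicing k zero blocks saves exactly 2k-1 characters, so the first shortest candidate is the splice at the first longest run); normalization and the edge-colon patching stay as in A.
import Mathlib
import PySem

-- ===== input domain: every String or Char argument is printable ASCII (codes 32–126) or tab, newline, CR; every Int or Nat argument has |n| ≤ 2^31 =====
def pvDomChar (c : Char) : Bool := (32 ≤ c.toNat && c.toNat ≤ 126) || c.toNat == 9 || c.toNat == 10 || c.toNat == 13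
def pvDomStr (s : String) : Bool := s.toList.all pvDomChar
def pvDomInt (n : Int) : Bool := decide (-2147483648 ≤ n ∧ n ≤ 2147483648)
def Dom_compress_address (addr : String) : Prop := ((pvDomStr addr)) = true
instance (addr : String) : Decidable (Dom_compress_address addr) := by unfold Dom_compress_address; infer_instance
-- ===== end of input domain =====

-- B replaces A's stateful longest-zero-run scan by brute force: one spliced candidate per
-- window of ≥2 consecutive zero blocks, shortest ':'-join wins (first on ties); objective:
-- alternative algorithm, not faster.

-- Helpers shared by BOTH ports: both Python versions contain, verbatim, the same block
-- normalisation line and the same ':'.join + leading/trailing ':' patch tail.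

-- blocks = addr.lower().split(":"); [block.lstrip('0') or '0' for block in blocks]
-- (split? is some for the non-empty separator ":"; the getD [] default is unreachable.
--  lstrip('0') is exactly dropWhile of the character '0'.)
def pvNorm (addr : String) : List String :=
  ((PySem.Str.split? (PySem.Str.lower addr) ":").getD []).map (fun block =>
    let s := String.ofList (block.toList.dropWhile (fun c => c == '0'))
    if s = "" then "0" else s)

-- the tail both Pythons share verbatim: ':'.join(blocks) and the leading/trailing ':' patches
def pvPatch (blocks : List String) : String :=
  let compressed := PySem.Str.join ":" blocks
  let compressed :=
    if PySem.Str.startswith compressed "::" then compressed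
    else if PySem.Str.startswith compressed ":" then ":" ++ compressed
    else compressed
  if PySem.Str.endswith compressed "::" then compressed
  else if PySem.Str.endswith compressed ":" && !(PySem.Str.endswith compressed "::") then
    compressed ++ ":"
  else compressed

-- ===== PORT A =====
-- while j < len(blocks) and blocks[j] == '0': j += 1   (returns the final j)
def runEnd (l : List String) (j : Nat) : Nat :=
  if h : j < l.length then
    if l[j] = "0" then runEnd l (j + 1) else j
  else j
termination_by l.length - j

theorem le_runEnd (l : List String) (j : Nat) : j ≤ runEnd l j := by
  rw [runEnd]; split
  · split
    · exact Nat.le_trans (Nat.le_succ j) (le_runEnd l (j + 1))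
    · exact Nat.le_refl j
  · exact Nat.le_refl j
termination_by l.length - j

theorem lt_runEnd (l : List String) (i : Nat) (h : i < l.length) (h0 : l[i] = "0") :
    i < runEnd l i := by
  have hj : runEnd l i = runEnd l (i + 1) := by rw [runEnd]; simp [h, h0]
  have := le_runEnd l (i + 1)
  omega

-- A's outer while loop: i walks the list; (ls, ll) = (longest_start, longest_len).
def aLoop (l : List String) (i : Nat) (ls : Int) (ll : Nat) : Int × Nat :=
  if h : i < l.length then
    if h0 : l[i] = "0" then
      let j := runEnd l i
      if j - i > ll then aLoop l j (i : Int) (j - i) else aLoop l j ls ll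
    else aLoop l (i + 1) ls ll
  else (ls, ll)
termination_by l.length - i
decreasing_by
  all_goals first
  | (have := lt_runEnd l i h h0; omega)
  | omega

def compress_address (addr : String) : String :=
  let blocks := pvNorm addr
  let p := aLoop blocks 0 (-1) 0
  let blocks :=
    if p.2 > 1 then
      PySem.List.slice blocks none (some p.1) ++ [""]
        ++ PySem.List.slice blocks (some (p.1 + (p.2 : Int))) none
    else blocks
  pvPatch blocks

-- ===== PORT B =====
-- blocks[:i] + [''] + blocks[j+1:]  (i, j come from range(n), so take/drop are exact)
def spliceAt (l : List String) (i j : Nat) : List String := l.take i ++ [""] ++ l.drop (j + 1)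

-- the inner 'for j in range(i, n): if blocks[j] != "0": break; if j > i: append(splice)'
def winsFrom (l : List String) (i j : Nat) : List (List String) :=
  if h : j < l.length then
    if l[j] = "0" then (if i < j then [spliceAt l i j] else []) ++ winsFrom l i (j + 1)
    else []
  else []
termination_by l.length - j

-- key=lambda bs: len(':'.join(bs))
def pvKey (bs : List String) : Int := PySem.Str.len (PySem.Str.join ":" bs)

def compress_address_alt (addr : String) : String :=
  let blocks := pvNorm addr
  let candidates := blocks :: (List.range blocks.length).flatMap (fun i => winsFrom blocks i i)
  -- min over a nonempty list never raises; the [] default is unreachable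
  let best := (PySem.List.min? candidates pvKey).getD []
  pvPatch best

-- ===== PRECONDITION & SPEC =====
def Spec_compress_address (addr : String) (out : String) : Prop := out = compress_address_alt addr
instance (addr : String) (out : String) : Decidable (Spec_compress_address addr out) := by unfold Spec_compress_address; infer_instance

-- ===== CLAIM (what is proved, stated in full; the proofs are below) =====
def Claim_equal_compress_address : Prop := ∀ (addr : String), Dom_compress_address addr → Spec_compress_address addr (compress_address addr)

-- ===== LEMMAS AND PROOFS =====

-- properties of the shared zero-run scanner ------------------------------------------------

theorem runEnd_zeros (l : List String) (j : Nat) :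
    ∀ k, j ≤ k → k < runEnd l j → l[k]? = some "0" := by
  intro k hjk hk
  rw [runEnd] at hk
  by_cases h : j < l.length
  · simp only [dif_pos h] at hk
    by_cases h0 : l[j] = "0"
    · rw [if_pos h0] at hk
      rcases Nat.eq_or_lt_of_le hjk with rfl | hlt
      · simp [List.getElem?_eq_getElem h, h0]
      · exact runEnd_zeros l (j+1) k hlt hk
    · rw [if_neg h0] at hk; omega
  · simp only [dif_neg h] at hk; omega
termination_by l.length - j
decreasing_by simp_all; omega

theorem runEnd_stop (l : List String) (j : Nat) :
    runEnd l j = l.length ∨ l[runEnd l j]? ≠ some "0" := by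
  rw [runEnd]
  by_cases h : j < l.length
  · simp only [dif_pos h]
    by_cases h0 : l[j] = "0"
    · rw [if_pos h0]; exact runEnd_stop l (j+1)
    · rw [if_neg h0]; right
      rw [List.getElem?_eq_getElem h]; simp [h0]
  · simp only [dif_neg h]; right
    rw [List.getElem?_eq_none (by omega)]; simp
termination_by l.length - j
decreasing_by simp_all; omega

theorem runEnd_le_length (l : List String) (j : Nat) (h : j ≤ l.length) :
    runEnd l j ≤ l.length := by
  rw [runEnd]
  by_cases h1 : j < l.length
  · simp only [dif_pos h1]
    split
    · exact runEnd_le_length l (j+1) h1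
    · omega
  · simp only [dif_neg h1]; omega
termination_by l.length - j
decreasing_by simp_all; omega

theorem runEnd_fix (l : List String) (i : Nat) : runEnd l (runEnd l i) = runEnd l i := by
  by_cases h : runEnd l i < l.length
  · have h0 : ¬ l[runEnd l i]'h = "0" := by
      rcases runEnd_stop l i with hs | hs
      · omega
      · intro hc; apply hs; rw [List.getElem?_eq_getElem h, hc]
    rw [runEnd]; simp only [dif_pos h, if_neg h0]
  · rw [runEnd]; simp only [dif_neg h]

theorem runEnd_mid (l : List String) (i j : Nat) (hij : i ≤ j) (hje : j ≤ runEnd l i) :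
    runEnd l j = runEnd l i := by
  by_cases h : j < runEnd l i
  · have hz : l[j]? = some "0" := runEnd_zeros l i j hij h
    have hjn : j < l.length := by
      rcases List.getElem?_eq_some_iff.mp hz with ⟨hlt, _⟩; exact hlt
    have h0 : l[j]'hjn = "0" := by
      rw [List.getElem?_eq_getElem hjn] at hz; exact Option.some.inj hz
    have hstep : runEnd l j = runEnd l (j+1) := by
      rw [runEnd]; simp only [dif_pos hjn, if_pos h0]
    rw [hstep]
    exact runEnd_mid l i (j+1) (by omega) (by omega)
  · have hj : j = runEnd l i := by omega
    rw [hj, runEnd_fix]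
termination_by runEnd l i - j
decreasing_by omega

-- the length of a ':'-join ------------------------------------------------------------------

theorem chars_join_len : ∀ (xs : List (List Char)), xs ≠ [] →
    (PySem.Chars.join [':'] xs).length = (xs.map List.length).sum + xs.length - 1
  | [], h => absurd rfl h
  | [x], _ => by
    rw [PySem.Chars.join_singleton]; simp
  | x :: y :: t, _ => by
    rw [PySem.Chars.join_cons_cons, List.length_append, List.length_append,
      chars_join_len (y :: t) (by simp)]
    simp only [List.map_cons, List.sum_cons, List.length_cons, List.length_nil]
    omega

theorem pvKey_eq (bs : List String) (h : bs ≠ []) :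
    pvKey bs = (((bs.map (fun s => s.toList.length)).sum : Nat) : Int) + (bs.length : Int) - 1 := by
  have h1 : 1 ≤ bs.length := List.length_pos_iff.mpr h
  unfold pvKey PySem.Str.len PySem.Str.join
  rw [String.toList_ofList]
  rw [show (":".toList) = [':'] from rfl]
  rw [chars_join_len _ (by simpa using h)]
  rw [show List.map List.length (List.map String.toList bs)
      = List.map (fun s => s.toList.length) bs from by rw [List.map_map]; rfl]
  rw [List.length_map]
  omega

theorem sum_len_zeros : ∀ (ms : List String), (∀ s ∈ ms, s = "0") →
    (ms.map (fun s => s.toList.length)).sum = ms.length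
  | [], _ => rfl
  | x :: t, h => by
    have hx : x = "0" := h x (by simp)
    have ht := sum_len_zeros t (fun s hs => h s (by simp [hs]))
    rw [List.map_cons, List.sum_cons, ht, hx, List.length_cons,
      show ("0" : String).toList.length = 1 from rfl]
    omega

theorem key_spliceAt (l : List String) (i j : Nat) (hij : i ≤ j) (hj : j < l.length)
    (hz : ∀ m, i ≤ m → m ≤ j → l[m]? = some "0") :
    pvKey (spliceAt l i j) = pvKey l - 2*((j : Int) - (i : Int)) - 1 := by
  have hne : l ≠ [] := by intro hc; rw [hc] at hj; simp at hj
  have hsne : spliceAt l i j ≠ [] := by simp [spliceAt]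
  have hdec : l = l.take i ++ (((l.drop i).take (j + 1 - i)) ++ l.drop (j+1)) := by
    conv_lhs => rw [← List.take_append_drop i l]
    congr 1
    conv_lhs => rw [← List.take_append_drop (j + 1 - i) (l.drop i)]
    congr 1
    rw [List.drop_drop]
    congr 1
    omega
  have hmlen : ((l.drop i).take (j + 1 - i)).length = j + 1 - i := by
    rw [List.length_take, List.length_drop]; omega
  have hmz : ∀ s ∈ (l.drop i).take (j + 1 - i), s = "0" := by
    intro s hs
    rw [List.mem_iff_getElem] at hs
    obtain ⟨k, hk, hkeq⟩ := hs
    rw [hmlen] at hk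
    rw [List.getElem_take, List.getElem_drop] at hkeq
    have hzk := hz (i + k) (by omega) (by omega)
    rw [List.getElem?_eq_getElem (by omega)] at hzk
    rw [← hkeq]
    exact Option.some.inj hzk
  have hsum_mid : (((l.drop i).take (j + 1 - i)).map (fun s => s.toList.length)).sum = j + 1 - i := by
    rw [sum_len_zeros _ hmz, hmlen]
  have hLsum : (l.map (fun s => s.toList.length)).sum
      = ((l.take i).map (fun s => s.toList.length)).sum + (j + 1 - i)
        + ((l.drop (j+1)).map (fun s => s.toList.length)).sum := by
    conv_lhs => rw [hdec]
    simp only [List.map_append, List.sum_append, hsum_mid]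
    omega
  have hssum : ((spliceAt l i j).map (fun s => s.toList.length)).sum
      = ((l.take i).map (fun s => s.toList.length)).sum
        + ((l.drop (j+1)).map (fun s => s.toList.length)).sum := by
    simp [spliceAt, List.map_append, List.sum_append]
  have hslen : (spliceAt l i j).length = i + 1 + (l.length - (j+1)) := by
    simp [spliceAt, List.length_take, List.length_drop]
    omega
  rw [pvKey_eq _ hsne, pvKey_eq l hne, hssum, hslen]
  omega

-- the min() fold ---------------------------------------------------------------------------

def foldB (a : List String) (L : List (List String)) : List String :=
  List.foldl (fun m y => if pvKey y < pvKey m then y else m) a L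

theorem foldB_append (a : List String) (L1 L2 : List (List String)) :
    foldB a (L1 ++ L2) = foldB (foldB a L1) L2 := List.foldl_append

theorem min?_cons_pvKey (x : List String) (xs : List (List String)) :
    PySem.List.min? (x :: xs) pvKey = some (foldB x xs) := by
  induction xs generalizing x with
  | nil => rfl
  | cons y t ih =>
    show List.foldl _ (if pvKey y < pvKey x then some y else some x) t
        = some (foldB x (y :: t))
    by_cases h : pvKey y < pvKey x
    · rw [if_pos h]
      have hy : List.foldl _ (some y) t = some (foldB y t) := ih y
      rw [hy, show foldB x (y :: t) = foldB y t from by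
        show foldB (if pvKey y < pvKey x then y else x) t = foldB y t
        rw [if_pos h]]
    · rw [if_neg h]
      have hx : List.foldl _ (some x) t = some (foldB x t) := ih x
      rw [hx, show foldB x (y :: t) = foldB x t from by
        show foldB (if pvKey y < pvKey x then y else x) t = foldB x t
        rw [if_neg h]]

theorem foldB_id (a : List String) (L : List (List String))
    (h : ∀ y ∈ L, ¬ pvKey y < pvKey a) : foldB a L = a := by
  induction L with
  | nil => rfl
  | cons y t ih =>
    show foldB (if pvKey y < pvKey a then y else a) t = a
    rw [if_neg (h y (by simp))]
    exact ih (fun z hz => h z (by simp [hz]))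

theorem foldB_last : ∀ (zs : List (List String)) (z a : List String),
    List.Pairwise (fun x y => pvKey y < pvKey x) (zs ++ [z]) →
    foldB a (zs ++ [z]) = if pvKey z < pvKey a then z else a
  | [], z, a, _ => rfl
  | y :: t, z, a, hpw => by
    obtain ⟨hy, hrest⟩ := List.pairwise_cons.mp hpw
    have hzy : pvKey z < pvKey y := hy z (by simp)
    show foldB (if pvKey y < pvKey a then y else a) (t ++ [z]) = _
    rw [foldB_last t z _ hrest]
    by_cases h1 : pvKey y < pvKey a
    · rw [if_pos h1, if_pos (by omega : pvKey z < pvKey y), if_pos (by omega : pvKey z < pvKey a)]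
    · rw [if_neg h1]

-- windows -----------------------------------------------------------------------------------

theorem pairwise_lt_range1 (s n : Nat) : List.Pairwise (· < ·) (List.range' s n) := by
  induction n generalizing s with
  | zero => simp
  | succ n ih =>
    rw [List.range'_succ]
    refine List.pairwise_cons.mpr ⟨fun m hm => ?_, ih (s+1)⟩
    have := (List.mem_range'_1.mp hm).1
    omega

theorem range1_concat (s n : Nat) : List.range' s (n+1) = List.range' s n ++ [s + n] := by
  induction n generalizing s with
  | zero => simp [List.range'_succ]
  | succ n ih =>
    rw [List.range'_succ, ih (s+1), List.range'_succ, List.cons_append]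
    have : s + 1 + n = s + (n + 1) := by omega
    rw [this]

theorem winsFrom_eq (l : List String) (i : Nat) : ∀ (j : Nat), i ≤ j →
    winsFrom l i j = (List.range' (max j (i+1)) (runEnd l j - max j (i+1))).map (spliceAt l i) := by
  intro j hij
  rw [winsFrom, runEnd]
  by_cases h : j < l.length
  · simp only [dif_pos h]
    by_cases h0 : l[j] = "0"
    · simp only [if_pos h0]
      have ih := winsFrom_eq l i (j+1) (by omega)
      have hje : j + 1 ≤ runEnd l (j+1) := le_runEnd l (j+1)
      by_cases hji : i < j
      · rw [show max j (i+1) = j from by omega, ih, show max (j+1) (i+1) = j + 1 from by omega]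
        rw [show List.range' j (runEnd l (j+1) - j)
              = j :: List.range' (j+1) (runEnd l (j+1) - (j+1)) from by
          rw [show runEnd l (j+1) - j = (runEnd l (j+1) - (j+1)) + 1 from by omega, List.range'_succ]]
        rw [List.map_cons]
        simp [hji]
      · have hji' : j = i := by omega
        subst hji'
        rw [show max j (j+1) = j + 1 from by omega, ih, show max (j+1) (j+1) = j + 1 from by omega]
        simp
    · simp only [if_neg h0]
      rw [show j - max j (i+1) = 0 from by omega]
      simp
  · simp only [dif_neg h]
    rw [show j - max j (i+1) = 0 from by omega]
    simp
termination_by j => l.length - j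
decreasing_by omega

-- the state correspondence ------------------------------------------------------------------

def repB (l : List String) (ls : Int) (ll : Nat) : List String :=
  if 1 < ll then spliceAt l ls.toNat (ls.toNat + ll - 1) else l

def GS (l : List String) (ls : Int) (ll : Nat) : Prop :=
  1 < ll → 0 ≤ ls ∧ ls.toNat + ll ≤ l.length ∧
    ∀ m, ls.toNat ≤ m → m < ls.toNat + ll → l[m]? = some "0"

theorem key_repB (l : List String) (ls : Int) (ll : Nat) (hgs : GS l ls ll) (hll : 1 < ll) :
    pvKey (repB l ls ll) = pvKey l - 2*(ll : Int) + 1 := by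
  obtain ⟨h0, h1, h2⟩ := hgs hll
  rw [repB, if_pos hll]
  rw [key_spliceAt l ls.toNat (ls.toNat + ll - 1) (by omega) (by omega)
    (fun m ha hb => h2 m ha (by omega))]
  rw [show ((ls.toNat + ll - 1 : Nat) : Int) = (ls.toNat : Int) + (ll : Int) - 1 from by omega]
  ring

theorem aLoop_GS (l : List String) (i : Nat) (ls : Int) (ll : Nat) (hi : i ≤ l.length)
    (hgs : GS l ls ll) : GS l (aLoop l i ls ll).1 (aLoop l i ls ll).2 := by
  rw [aLoop]
  by_cases h : i < l.length
  · simp only [dif_pos h]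
    by_cases h0 : l[i] = "0"
    · simp only [dif_pos h0]
      have hie := lt_runEnd l i h h0
      have hen := runEnd_le_length l i (Nat.le_of_lt h)
      by_cases hgt : runEnd l i - i > ll
      · simp only [if_pos hgt]
        refine aLoop_GS l (runEnd l i) _ _ hen ?_
        intro _
        refine ⟨Int.natCast_nonneg i, ?_, ?_⟩
        · rw [Int.toNat_natCast]; omega
        · intro m hm1 hm2
          rw [Int.toNat_natCast] at hm1 hm2
          exact runEnd_zeros l i m hm1 (by omega)
      · simp only [if_neg hgt]
        exact aLoop_GS l (runEnd l i) ls ll hen hgs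
    · simp only [dif_neg h0]
      exact aLoop_GS l (i+1) ls ll h hgs
  · simp only [dif_neg h]
    exact hgs
termination_by l.length - i
decreasing_by
  all_goals first
  | (have := lt_runEnd l i h h0; omega)
  | omega

theorem skip_run (l : List String) (i e : Nat) (hie : i < e) (hen : e ≤ l.length)
    (hz : ∀ m, i ≤ m → m < e → l[m]? = some "0") (hend : runEnd l i = e)
    (acc : List String) (ll' : Nat) (hll : e - i ≤ ll')
    (hkey : pvKey acc = pvKey l - 2*(ll' : Int) + 1) :
    foldB acc ((List.range' (i+1) (e - i - 1)).flatMap (fun m => winsFrom l m m)) = acc := by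
  apply foldB_id
  intro y hy
  rw [List.mem_flatMap] at hy
  obtain ⟨m, hm, hy⟩ := hy
  rw [List.mem_range'_1] at hm
  have hme : m < e := by omega
  have hre : runEnd l m = e := by
    rw [← hend]; exact runEnd_mid l i m (by omega) (by rw [hend]; omega)
  rw [winsFrom_eq l m m (Nat.le_refl m), hre, show max m (m+1) = m + 1 from by omega] at hy
  rw [List.mem_map] at hy
  obtain ⟨j', hj', rfl⟩ := hy
  rw [List.mem_range'_1] at hj'
  rw [key_spliceAt l m j' (by omega) (by omega)
    (fun mm h1 h2 => hz mm (by omega) (by omega)), hkey]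
  omega

-- the simulation ----------------------------------------------------------------------------

theorem sim (l : List String) (i : Nat) (ls : Int) (ll : Nat) (hi : i ≤ l.length)
    (hgs : GS l ls ll) :
    foldB (repB l ls ll) ((List.range' i (l.length - i)).flatMap (fun m => winsFrom l m m))
      = repB l (aLoop l i ls ll).1 (aLoop l i ls ll).2 := by
  rw [aLoop]
  by_cases h : i < l.length
  · simp only [dif_pos h]
    by_cases h0 : l[i] = "0"
    · simp only [dif_pos h0]
      have hie : i < runEnd l i := lt_runEnd l i h h0
      have hen : runEnd l i ≤ l.length := runEnd_le_length l i (Nat.le_of_lt h)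
      have hz : ∀ m, i ≤ m → m < runEnd l i → l[m]? = some "0" :=
        fun m hm hme => runEnd_zeros l i m hm hme
      have hr1 : List.range' i (l.length - i)
          = List.range' i (runEnd l i - i) ++ List.range' (runEnd l i) (l.length - runEnd l i) := by
        have h1 := @List.range'_append i (runEnd l i - i) (l.length - runEnd l i) 1
        rw [show i + 1 * (runEnd l i - i) = runEnd l i from by omega,
          show (runEnd l i - i) + (l.length - runEnd l i) = l.length - i from by omega] at h1
        exact h1.symm
      have hr2 : List.range' i (runEnd l i - i)
          = i :: List.range' (i+1) (runEnd l i - i - 1) := by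
        conv_lhs => rw [show runEnd l i - i = (runEnd l i - i - 1) + 1 from by omega]
        rw [List.range'_succ]
      rw [hr1, hr2, List.flatMap_append, List.flatMap_cons, foldB_append, foldB_append]
      have hwf : winsFrom l i i
          = (List.range' (i+1) (runEnd l i - (i+1))).map (spliceAt l i) := by
        rw [winsFrom_eq l i i (Nat.le_refl i), show max i (i+1) = i + 1 from by omega]
      by_cases hk2 : 2 ≤ runEnd l i - i
      · have hsplit : winsFrom l i i
            = ((List.range' (i+1) (runEnd l i - i - 2)).map (spliceAt l i))
              ++ [spliceAt l i (runEnd l i - 1)] := by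
          rw [hwf, show runEnd l i - (i+1) = (runEnd l i - i - 2) + 1 from by omega,
            range1_concat, List.map_append,
            show i + 1 + (runEnd l i - i - 2) = runEnd l i - 1 from by omega]
          rfl
        have hpw : List.Pairwise (fun x y => pvKey y < pvKey x) (winsFrom l i i) := by
          rw [hwf, List.pairwise_map]
          refine (pairwise_lt_range1 (i+1) (runEnd l i - (i+1))).imp_of_mem ?_
          intro a b ha hb hab
          rw [List.mem_range'_1] at ha hb
          rw [key_spliceAt l i a (by omega) (by omega)
              (fun m h1 h2 => hz m (by omega) (by omega)),
            key_spliceAt l i b (by omega) (by omega)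
              (fun m h1 h2 => hz m (by omega) (by omega))]
          omega
        rw [hsplit] at hpw
        rw [hsplit, foldB_last _ _ _ hpw]
        have hkz : pvKey (spliceAt l i (runEnd l i - 1))
            = pvKey l - 2*((runEnd l i - i : Nat) : Int) + 1 := by
          rw [key_spliceAt l i (runEnd l i - 1) (by omega) (by omega)
            (fun m h1 h2 => hz m (by omega) (by omega))]
          rw [show ((runEnd l i - 1 : Nat) : Int) = ((runEnd l i : Nat) : Int) - 1 from by omega,
            show ((runEnd l i - i : Nat) : Int) = ((runEnd l i : Nat) : Int) - (i : Int) from by omega]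
          ring
        by_cases hgt : runEnd l i - i > ll
        · simp only [if_pos hgt]
          have hcond : pvKey (spliceAt l i (runEnd l i - 1)) < pvKey (repB l ls ll) := by
            by_cases hll : 1 < ll
            · rw [key_repB l ls ll hgs hll, hkz]; omega
            · rw [show repB l ls ll = l from by simp [repB, hll], hkz]; omega
          rw [if_pos hcond]
          have hrepz : spliceAt l i (runEnd l i - 1) = repB l (i : Int) (runEnd l i - i) := by
            rw [repB, if_pos (by omega : 1 < runEnd l i - i), Int.toNat_natCast,
              show i + (runEnd l i - i) - 1 = runEnd l i - 1 from by omega]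
          have hgsN : GS l (i : Int) (runEnd l i - i) := by
            intro _
            refine ⟨Int.natCast_nonneg i, ?_, ?_⟩
            · rw [Int.toNat_natCast]; omega
            · intro m hm1 hm2
              rw [Int.toNat_natCast] at hm1 hm2
              exact hz m hm1 (by omega)
          rw [hrepz, skip_run l i (runEnd l i) hie hen hz rfl _ (runEnd l i - i) (by omega)
            (by rw [key_repB l (i : Int) (runEnd l i - i) hgsN (by omega)])]
          exact sim l (runEnd l i) (i : Int) (runEnd l i - i) hen hgsN
        · simp only [if_neg hgt]
          have hll : 1 < ll := by omega
          have hcond : ¬ pvKey (spliceAt l i (runEnd l i - 1)) < pvKey (repB l ls ll) := by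
            rw [key_repB l ls ll hgs hll, hkz]; omega
          rw [if_neg hcond]
          rw [skip_run l i (runEnd l i) hie hen hz rfl _ ll (by omega)
            (key_repB l ls ll hgs hll)]
          exact sim l (runEnd l i) ls ll hen hgs
      · have hk1 : runEnd l i = i + 1 := by omega
        have hwf0 : winsFrom l i i = [] := by
          rw [hwf, show runEnd l i - (i+1) = 0 from by omega]
          simp
        have hmid : List.range' (i+1) (runEnd l i - i - 1) = [] := by
          rw [show runEnd l i - i - 1 = 0 from by omega]
          rfl
        rw [hwf0, hmid]
        simp only [List.flatMap_nil]
        by_cases hgt : runEnd l i - i > ll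
        · simp only [if_pos hgt]
          have hll0 : ll = 0 := by omega
          have hrep : repB l ls ll = repB l (i : Int) (runEnd l i - i) := by
            rw [repB, repB, if_neg (by omega : ¬ 1 < ll),
              if_neg (by omega : ¬ 1 < runEnd l i - i)]
          rw [show foldB (repB l ls ll) [] = repB l ls ll from rfl, hrep]
          exact sim l (runEnd l i) (i : Int) (runEnd l i - i)
            hen (fun hc => absurd hc (by omega))
        · simp only [if_neg hgt]
          rw [show foldB (repB l ls ll) [] = repB l ls ll from rfl]
          exact sim l (runEnd l i) ls ll hen hgs
    · simp only [dif_neg h0]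
      have hwf0 : winsFrom l i i = [] := by
        rw [winsFrom]; simp only [dif_pos h, if_neg h0]
      have hr : List.range' i (l.length - i)
          = i :: List.range' (i+1) (l.length - (i+1)) := by
        rw [show l.length - i = (l.length - (i+1)) + 1 from by omega, List.range'_succ]
      rw [hr, List.flatMap_cons, hwf0, List.nil_append]
      exact sim l (i+1) ls ll h hgs
  · simp only [dif_neg h]
    rw [show l.length - i = 0 from by omega]
    rfl
termination_by l.length - i
decreasing_by
  all_goals first
  | (have := lt_runEnd l i h h0; omega)
  | omega

-- assembling the two ports ------------------------------------------------------------------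

theorem middle_eq (l : List String) :
    (let p := aLoop l 0 (-1) 0
     if p.2 > 1 then
       PySem.List.slice l none (some p.1) ++ [""]
         ++ PySem.List.slice l (some (p.1 + (p.2 : Int))) none
     else l)
    = (PySem.List.min? (l :: (List.range l.length).flatMap (fun i => winsFrom l i i)) pvKey).getD [] := by
  have hgs0 : GS l (-1) 0 := fun hc => absurd hc (by omega)
  have hsim := sim l 0 (-1) 0 (Nat.zero_le _) hgs0
  have hGS := aLoop_GS l 0 (-1) 0 (Nat.zero_le _) hgs0
  rw [min?_cons_pvKey]
  rw [List.range_eq_range']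
  rw [show repB l (-1) 0 = l from by rw [repB, if_neg (by omega)]] at hsim
  rw [show List.range' 0 l.length = List.range' 0 (l.length - 0) from by rw [Nat.sub_zero]]
  rw [Option.getD_some, hsim]
  by_cases hp : 1 < (aLoop l 0 (-1) 0).2
  · obtain ⟨hls, hlen, _⟩ := hGS hp
    rw [repB, if_pos hp]
    simp only [if_pos (by omega : (aLoop l 0 (-1) 0).2 > 1)]
    rw [show (aLoop l 0 (-1) 0).1 = (((aLoop l 0 (-1) 0).1.toNat : Nat) : Int) from
      (Int.toNat_of_nonneg hls).symm]
    rw [PySem.List.slice_to_natCast]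
    rw [show ((((aLoop l 0 (-1) 0).1.toNat : Nat) : Int) + ((aLoop l 0 (-1) 0).2 : Int))
        = (((aLoop l 0 (-1) 0).1.toNat + (aLoop l 0 (-1) 0).2 : Nat) : Int) from by push_cast; ring]
    rw [PySem.List.slice_from_natCast, spliceAt]
    simp only [Int.toNat_natCast]
    rw [show (aLoop l 0 (-1) 0).1.toNat + (aLoop l 0 (-1) 0).2 - 1 + 1
        = (aLoop l 0 (-1) 0).1.toNat + (aLoop l 0 (-1) 0).2 from by omega]
  · rw [repB, if_neg hp]
    simp only [if_neg (by omega : ¬ (aLoop l 0 (-1) 0).2 > 1)]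

-- ===== VERDICT (by name: the statement is the Claim_ definition above) =====
theorem compress_address_spec : Claim_equal_compress_address := by
  intro addr _
  unfold Spec_compress_address compress_address compress_address_alt
  exact congrArg pvPatch (middle_eq (pvNorm addr))
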